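-- pv_equiv track=rewrite | github.com/joshuazlin/joshuazlin.github.io | berkeley/misc/fintop.py | legal
-- ===== SOURCE A (Python) =====
-- from copy import deepcopy
--
-- def pick(x):
-- 	#input an integer x, and returns all x-long arrays of 0s and 1s
-- 	xx = [0] * x
-- 	xxxx = []
-- 	for xxx in range(0,2**x):
-- 		xxxx.append(deepcopy(xx))
-- 		for yyy in range(x-1, -1, -1):
-- 			if xx[yyy] == 0:
-- 				for yyyy in range(x-1, yyy, -1):
-- 					xx[yyyy] = 0
-- 				xx[yyy] = 1
-- 				break
-- 	return(deepcopy(xxxx))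
--
-- def union(x,y):
-- 	#returns the union of the sets x and y
-- 	xx = []
-- 	for xxx in range(0,len(x)):
-- 		if x[xxx] not in xx:
-- 			xx.append(x[xxx])
-- 	for xxx in range(0,len(y)):
-- 		if y[xxx] not in xx:
-- 			xx.append(y[xxx])
-- 	return(deepcopy(xx))
--
-- def intersection(x,y):
-- 	#returns the intersection of the sets x and y
-- 	xx = []
-- 	for xxx in range(0,len(x)):
-- 		for xxxx in range(0,len(y)):
-- 			if x[xxx] == y[xxxx]:
-- 				xx.append(x[xxx])
-- 				break
-- 	return(deepcopy(xx))
--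
-- def subset(x,y):
-- 	#returns whether or not x (a set of numbers) is an element of y (a set of sets of numbers)
-- 	for xx in range(0,len(y)):
-- 		xy = 1
-- 		for xxx in range(0,len(x)):
-- 			if (x[xxx] not in y[xx]):
-- 				xy = 0
-- 				break
-- 		if xy == 1:
-- 			return 1
-- 	return 0
--
-- def legal(x):
-- 	#is the set x of sets a legal topology??
-- 	xxx = 0
-- 	for xx in range(0,len(x)):
-- 		if len(x[xx]) == 0:
-- 			xxx = 1
-- 			break
-- 	if xxx == 0:
-- 		return 0
-- 	xxx = 0
-- 	for xx in range(0,len(x)):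
-- 		if len(x[xx]) == n:
-- 			xxx = 1
-- 			break
-- 	if xxx == 0:
-- 		return 0
-- 	xx = pick(len(x))
-- 	for xxx in range(0,len(xx)):
-- 		y = []
-- 		yy = -1
-- 		for xxxx in range(0,len(x)):
-- 			if (xx[xxx][xxxx] == 1):
-- 				if yy == -1:
-- 					yy = deepcopy(x[xxxx])
-- 				y = union(y,deepcopy(x[xxxx]))
-- 				yy = intersection(yy,deepcopy(x[xxxx]))
-- 		if subset(deepcopy(y),deepcopy(x)) == 0:
-- 			return 0
-- 		if yy != -1:
-- 			if subset(deepcopy(yy),deepcopy(x)) == 0: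
-- 				return 0
-- 	return 1
--
-- n = 3
-- ===== SOURCE B (Python) =====
-- n = 3
--
-- def legal(x):
--     # One pass for each guard, then a single union-of-everything check:
--     # every subfamily's union is contained in the union of the whole family,
--     # so closure under the A-style "subset of some member" test reduces to
--     # checking the full union once (intersections are always inside a member).
--     if not any(len(s) == 0 for s in x):
--         return 0
--     if not any(len(s) == n for s in x):
--         return 0
--     total = []
--     for s in x:
--         for e in s:
--             if e not in total:
--                 total.append(e)
--     for s in x:
--         if all(e in s for e in total):
--             return 1
--     return 0
-- ===== Notes on version B (the rewrite author's own statement) =====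
-- stated objective: faster
-- what changed: B replaces A's enumeration of all 2^m bit-vectors of subfamilies (each with quadratic union/intersection/membership work) by two one-pass length guards plus a single check that the union of the whole family is contained in some member, which implies every subfamily's union check (and the intersection check is always inside a member).
import Mathlib
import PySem

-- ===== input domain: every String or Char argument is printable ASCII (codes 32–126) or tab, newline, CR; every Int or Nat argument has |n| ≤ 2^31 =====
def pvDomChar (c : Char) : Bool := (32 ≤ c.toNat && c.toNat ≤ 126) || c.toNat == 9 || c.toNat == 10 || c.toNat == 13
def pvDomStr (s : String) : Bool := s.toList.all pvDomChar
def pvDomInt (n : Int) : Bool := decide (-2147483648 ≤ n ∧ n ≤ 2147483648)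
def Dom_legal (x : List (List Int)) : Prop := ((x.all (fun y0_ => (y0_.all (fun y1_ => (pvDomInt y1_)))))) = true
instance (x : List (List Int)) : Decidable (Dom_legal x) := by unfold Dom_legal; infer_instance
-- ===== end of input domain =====

-- B replaces A's loop over all 2^m subfamilies by a single union-of-everything
-- containment check (plus the two one-pass guards); objective: faster (asymptotic).

-- ===== PORT A =====
-- union(x,y): two sequential 'append if not already present' loops into xx = []
def unionA (x y : List Int) : List Int :=
  y.foldl (fun xx e => if xx.contains e then xx else xx ++ [e])
    (x.foldl (fun xx e => if xx.contains e then xx else xx ++ [e]) [])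

-- intersection(x,y): for each element of x, inner scan-with-break over y = contains
def interA (x y : List Int) : List Int :=
  x.foldl (fun xx e => if y.contains e then xx ++ [e] else xx) []

-- subset(x,y): loop over members of y; inner flag/break loop = 'all elements of x occur'
def subsetA (x : List Int) : List (List Int) → Int
  | [] => 0
  | t :: rest => if x.all (fun e => t.contains e) then 1 else subsetA x rest

-- pick's inner increment loop, scanning indices x-1 … 0 (i.e. the REVERSED list):
-- the trailing 1s it walks past are zeroed, the first 0 from the right becomes 1, break.
def pickInc : List Int → List Int
  | [] => []
  | b :: t => if b = 0 then 1 :: t else 0 :: pickInc t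

-- pick(m): append the current vector, then increment, 2^m times (range(0, 2**x))
def pick (m : Nat) : List (List Int) :=
  ((List.range (2 ^ m)).foldl
      (fun st _ => ((pickInc st.1.reverse).reverse, st.2 ++ [st.1]))
      (List.replicate m (0 : Int), ([] : List (List Int)))).2

-- the two flag loops with break in legal: 'some member has length k'
def hasLen (k : Nat) : List (List Int) → Int
  | [] => 0
  | s :: rest => if s.length = k then 1 else hasLen k rest

-- body of 'for xxxx in range(0,len(x))'; both pyGet? are in range whenever
-- b comes from pick(len x) (|b| = |x|), so the catch-all branch is unreachable there
def innerStep (x : List (List Int)) (b : List Int)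
    (st : List Int × Option (List Int)) (i : Nat) : List Int × Option (List Int) :=
  match PySem.List.pyGet? b (i : Int), PySem.List.pyGet? x (i : Int) with
  | some bi, some xi =>
      if bi = 1 then
        let yy := match st.2 with | none => xi | some v => v   -- 'if yy == -1: yy = x[xxxx]'
        (unionA st.1 xi, some (interA yy xi))
      else st
  | _, _ => st

def innerA (x : List (List Int)) (b : List Int) : List Int × Option (List Int) :=
  (List.range x.length).foldl (innerStep x b) ([], none)

-- the outer 'for xxx in range(0,len(xx))' loop with its two early returns
def legalLoop (x : List (List Int)) : List (List Int) → Int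
  | [] => 1
  | b :: rest =>
      -- y, yy are computed once by the inner loop; innerA x b is that pair
      if subsetA (innerA x b).1 x = 0 then 0
      else
        match (innerA x b).2 with               -- 'if yy != -1'
        | some v => if subsetA v x = 0 then 0 else legalLoop x rest
        | none => legalLoop x rest

def legal (x : List (List Int)) : Int :=
  if hasLen 0 x = 0 then 0
  else if hasLen 3 x = 0 then 0                 -- module-level n = 3
  else legalLoop x (pick x.length)

-- ===== PORT B =====
def legal_alt (x : List (List Int)) : Int :=
  if !(x.any (fun s => s.length = 0)) then 0
  else if !(x.any (fun s => s.length = 3)) then 0   -- n = 3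
  else if x.any (fun s =>
      (x.foldl (fun t s' =>
        s'.foldl (fun t e => if t.contains e then t else t ++ [e]) t) []).all
        (fun e => s.contains e)) then 1 else 0

-- ===== PRECONDITION & SPEC =====
def Spec_legal (x : List (List Int)) (out : Int) : Prop := out = legal_alt x
instance (x : List (List Int)) (out : Int) : Decidable (Spec_legal x out) := by unfold Spec_legal; infer_instance

-- ===== CLAIM (what is proved, stated in full; the proofs are below) =====
def Claim_equal_legal : Prop := ∀ (x : List (List Int)), Dom_legal x → Spec_legal x (legal x)

-- ===== LEMMAS AND PROOFS =====

-- membership through the 'append if not present' fold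
theorem mem_dedupFold (l : List Int) (acc : List Int) (a : Int) :
    a ∈ l.foldl (fun xx e => if xx.contains e then xx else xx ++ [e]) acc ↔ a ∈ acc ∨ a ∈ l := by
  induction l generalizing acc with
  | nil => simp
  | cons e t ih =>
    rw [List.foldl_cons]
    by_cases h : e ∈ acc
    · rw [if_pos (List.contains_iff_mem.mpr h), ih, List.mem_cons]
      constructor
      · rintro (h1 | h1)
        · exact Or.inl h1
        · exact Or.inr (Or.inr h1)
      · rintro (h1 | rfl | h1)
        · exact Or.inl h1
        · exact Or.inl h
        · exact Or.inr h1
    · rw [if_neg (fun hc => h (List.contains_iff_mem.mp hc)), ih, List.mem_append, List.mem_cons]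
      simp only [List.mem_cons, List.not_mem_nil, or_false]
      tauto

theorem mem_unionA (x y : List Int) (a : Int) : a ∈ unionA x y ↔ a ∈ x ∨ a ∈ y := by
  unfold unionA
  rw [mem_dedupFold, mem_dedupFold]
  tauto

theorem mem_interA (x y : List Int) (a : Int) : a ∈ interA x y → a ∈ x := by
  unfold interA
  rw [PySem.List.foldl_append_if_eq_filter]
  intro h
  rw [List.nil_append] at h
  exact (List.mem_filter.mp h).1

theorem subsetA_eq (s : List Int) (l : List (List Int)) :
    subsetA s l = if (∃ t ∈ l, ∀ e ∈ s, e ∈ t) then 1 else 0 := by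
  induction l with
  | nil => simp [subsetA]
  | cons t rest ih =>
    simp only [subsetA, ih]
    by_cases h : ∀ e ∈ s, e ∈ t
    · have hb : s.all (fun e => t.contains e) = true := by
        rw [List.all_eq_true]; intro e he; exact List.contains_iff_mem.mpr (h e he)
      rw [if_pos hb, if_pos ⟨t, by simp, h⟩]
    · have hb : ¬ (s.all (fun e => t.contains e) = true) := by
        rw [List.all_eq_true]; intro hall; exact h fun e he => List.contains_iff_mem.mp (hall e he)
      rw [if_neg hb]
      by_cases h2 : ∃ u ∈ rest, ∀ e ∈ s, e ∈ u
      · rcases h2 with ⟨u, hu, huu⟩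
        rw [if_pos ⟨u, hu, huu⟩, if_pos ⟨u, List.mem_cons_of_mem _ hu, huu⟩]
      · rw [if_neg h2, if_neg ?_]
        rintro ⟨u, hu, huu⟩
        rcases List.mem_cons.mp hu with rfl | hu
        · exact h huu
        · exact h2 ⟨u, hu, huu⟩

theorem hasLen_eq (k : Nat) (l : List (List Int)) :
    hasLen k l = if l.any (fun s => s.length = k) then 1 else 0 := by
  induction l with
  | nil => simp [hasLen]
  | cons s rest ih => simp only [hasLen, ih]; by_cases h : s.length = k <;> simp [h]

-- each step of the inner fold either skips or folds in a member x[i]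
theorem innerStep_cases (x : List (List Int)) (b : List Int)
    (st : List Int × Option (List Int)) (i : Nat) :
    innerStep x b st i = st ∨
    ∃ xi, xi ∈ x ∧ innerStep x b st i =
      (unionA st.1 xi, some (interA (match st.2 with | none => xi | some v => v) xi)) := by
  unfold innerStep
  rcases hb : PySem.List.pyGet? b (i : Int) with _ | bi
  · exact Or.inl rfl
  · rcases hx : PySem.List.pyGet? x (i : Int) with _ | xi
    · exact Or.inl rfl
    · by_cases hbi : bi = 1
      · right
        refine ⟨xi, ?_, ?_⟩
        · rw [PySem.List.pyGet?_natCast] at hx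
          exact List.mem_of_getElem? hx
        · simp [hbi]
      · left; simp [hbi]

-- invariants of the inner fold: y's elements come from members of x, and yy (when set)
-- is contained in some member of x
theorem innerFold_y_sub (x : List (List Int)) (b : List Int) (l : List Nat)
    (st : List Int × Option (List Int))
    (h : ∀ a ∈ st.1, ∃ s ∈ x, a ∈ s) :
    ∀ a ∈ (l.foldl (innerStep x b) st).1, ∃ s ∈ x, a ∈ s := by
  induction l generalizing st with
  | nil => exact h
  | cons i t ih =>
    refine ih _ ?_
    rcases innerStep_cases x b st i with heq | ⟨xi, hxi, heq⟩ <;> rw [heq]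
    · exact h
    · intro a ha
      rcases (mem_unionA _ _ _).mp ha with ha | ha
      · exact h a ha
      · exact ⟨xi, hxi, ha⟩

theorem innerFold_yy_sub (x : List (List Int)) (b : List Int) (l : List Nat)
    (st : List Int × Option (List Int))
    (h : ∀ v, st.2 = some v → ∃ s ∈ x, ∀ a ∈ v, a ∈ s) :
    ∀ v, (l.foldl (innerStep x b) st).2 = some v → ∃ s ∈ x, ∀ a ∈ v, a ∈ s := by
  induction l generalizing st with
  | nil => exact h
  | cons i t ih =>
    refine ih _ ?_
    rcases innerStep_cases x b st i with heq | ⟨xi, hxi, heq⟩ <;> rw [heq]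
    · exact h
    · intro v hv
      simp only at hv
      rcases hst : st.2 with _ | w
    -- yy was just set to xi; interA _ xi has all elements in xi ∈ x …
      · rw [hst] at hv
        refine ⟨xi, hxi, ?_⟩
        intro a ha
        rw [← Option.some.injEq] at hv
        have : v = interA xi xi := by simpa using hv.symm
        rw [this] at ha
        exact mem_interA _ _ _ ha
    -- … or yy was already inside some member s, and intersecting keeps it there
      · rcases h w hst with ⟨s, hs, hws⟩
        refine ⟨s, hs, ?_⟩
        rw [hst] at hv
        have : v = interA w xi := by simpa using hv.symm
        intro a ha
        rw [this] at ha
        exact hws a (mem_interA _ _ _ ha)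

-- monotonicity: the y component only grows
theorem innerFold_y_mono (x : List (List Int)) (b : List Int) (l : List Nat)
    (st : List Int × Option (List Int)) :
    ∀ a ∈ st.1, a ∈ (l.foldl (innerStep x b) st).1 := by
  induction l generalizing st with
  | nil => exact fun a ha => ha
  | cons i t ih =>
    intro a ha
    refine ih _ a ?_
    rcases innerStep_cases x b st i with heq | ⟨xi, _, heq⟩ <;> rw [heq]
    · exact ha
    · exact (mem_unionA _ _ _).mpr (Or.inl ha)

-- with b = all-ones, every element of every member ends up in y
theorem innerA_ones_full (x : List (List Int)) (i : Nat) (hi : i < x.length) :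
    ∀ a ∈ x[i], a ∈ (innerA x (List.replicate x.length 1)).1 := by
  unfold innerA
  have key : ∀ (l : List Nat) (st : List Int × Option (List Int)), i ∈ l →
      ∀ a ∈ x[i], a ∈ (l.foldl (innerStep x (List.replicate x.length 1)) st).1 := by
    intro l
    induction l with
    | nil => intro st h; simp at h
    | cons j t ih =>
      intro st hmem a ha
      rcases List.mem_cons.mp hmem with rfl | hmem
      · -- step i folds x[i] into y
        have hb : PySem.List.pyGet? (List.replicate x.length (1 : Int)) (i : Int) = some 1 := by
          rw [PySem.List.pyGet?_natCast]
          simp [hi]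
        have hx : PySem.List.pyGet? x (i : Int) = some x[i] := by
          rw [PySem.List.pyGet?_natCast]
          simp [List.getElem?_eq_getElem hi]
        have hstep : (innerStep x (List.replicate x.length 1) st i).1 = unionA st.1 x[i] := by
          unfold innerStep
          rw [hb, hx]
          simp
        rw [List.foldl_cons]
        refine innerFold_y_mono _ _ _ _ a ?_
        rw [hstep]
        exact (mem_unionA _ _ _).mpr (Or.inr ha)
      · exact ih _ hmem a ha
  intro a ha
  exact key (List.range x.length) _ (List.mem_range.mpr hi) a ha

-- if some member contains the union of the family, every iteration of the outer loop passes
theorem legalLoop_all_pass (x : List (List Int)) (T : List Int) (hT : T ∈ x)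
    (hcov : ∀ s ∈ x, ∀ a ∈ s, a ∈ T) :
    ∀ l, legalLoop x l = 1 := by
  intro l
  induction l with
  | nil => rfl
  | cons b rest ih =>
    unfold legalLoop
    have hy : subsetA (innerA x b).1 x = 1 := by
      rw [subsetA_eq]
      have := innerFold_y_sub x b (List.range x.length) ([], none) (by simp)
      refine if_pos ⟨T, hT, fun a ha => ?_⟩
      rcases this a ha with ⟨s, hs, has⟩
      exact hcov s hs a has
    rw [hy, if_neg (by norm_num : ¬ (1 : Int) = 0)]
    rcases hv : (innerA x b).2 with _ | v
    · exact ih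
    · have hv1 : subsetA v x = 1 := by
        rw [innerA] at hv
        rcases innerFold_yy_sub x b (List.range x.length) ([], none) (by simp) v hv with ⟨s, hs, hvs⟩
        rw [subsetA_eq]
        exact if_pos ⟨s, hs, hvs⟩
      show (if subsetA v x = 0 then 0 else legalLoop x rest) = 1
      rw [hv1, if_neg (by norm_num : ¬ (1 : Int) = 0)]
      exact ih

-- if some listed subfamily fails its union check, the loop returns 0
theorem legalLoop_zero (x : List (List Int)) (l : List (List Int)) (b : List Int)
    (hb : b ∈ l) (hfail : subsetA (innerA x b).1 x = 0) : legalLoop x l = 0 := by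
  induction l with
  | nil => simp at hb
  | cons c rest ih =>
    unfold legalLoop
    rcases List.mem_cons.mp hb with rfl | hb
    · rw [hfail]
      simp
    · split_ifs with h1
      · rfl
      · rcases hv2 : (innerA x c).2 with _ | v
        · exact ih hb
        · show (if subsetA v x = 0 then 0 else legalLoop x rest) = 0
          split_ifs with h2
          · rfl
          · exact ih hb

-- the binary counter: little-endian bits of k, and pickInc is +1 on it
def bitsLE : Nat → Nat → List Int
  | 0, _ => []
  | m + 1, k => (if k % 2 = 1 then 1 else 0) :: bitsLE m (k / 2)

theorem pickInc_bitsLE (m k : Nat) (h : k + 1 < 2 ^ m) :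
    pickInc (bitsLE m k) = bitsLE m (k + 1) := by
  induction m generalizing k with
  | zero => simp at h
  | succ m ih =>
    by_cases hk : k % 2 = 1
    · have h2 : (k + 1) % 2 = 0 := by omega
      have h3 : (k + 1) / 2 = k / 2 + 1 := by omega
      have h4 : k / 2 + 1 < 2 ^ m := by
        rw [pow_succ] at h; omega
      simp only [bitsLE, hk, pickInc, h2, h3]
      norm_num [ih _ h4]
    · have hk0 : k % 2 = 0 := by omega
      have h2 : (k + 1) % 2 = 1 := by omega
      have h3 : (k + 1) / 2 = k / 2 := by omega
      simp [bitsLE, hk0, pickInc, h2, h3]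

theorem bitsLE_zero (m : Nat) : bitsLE m 0 = List.replicate m 0 := by
  induction m with
  | zero => rfl
  | succ m ih => simp [bitsLE, ih, List.replicate_succ]

theorem bitsLE_top (m : Nat) : bitsLE m (2 ^ m - 1) = List.replicate m 1 := by
  induction m with
  | zero => rfl
  | succ m ih =>
    have h1 : (2 ^ (m + 1) - 1) % 2 = 1 := by
      have : 2 ^ (m+1) = 2 * 2 ^ m := by ring
      have hp : 1 ≤ 2 ^ m := Nat.one_le_two_pow
      omega
    have h2 : (2 ^ (m + 1) - 1) / 2 = 2 ^ m - 1 := by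
      have : 2 ^ (m+1) = 2 * 2 ^ m := by ring
      have hp : 1 ≤ 2 ^ m := Nat.one_le_two_pow
      omega
    simp [bitsLE, h1, h2, ih, List.replicate_succ]

theorem pick_state (m k : Nat) (hk : k < 2 ^ m) :
    ((List.range k).foldl (fun st (_ : Nat) => ((pickInc st.1.reverse).reverse, st.2 ++ [st.1]))
      (List.replicate m (0 : Int), ([] : List (List Int)))).1 = (bitsLE m k).reverse := by
  induction k with
  | zero => simp [bitsLE_zero]
  | succ k ih =>
    rw [List.range_succ, List.foldl_append]
    have ihk := ih (by omega)
    simp only [List.foldl_cons, List.foldl_nil, ihk]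
    rw [List.reverse_reverse, pickInc_bitsLE m k hk]

theorem ones_mem_pick (m : Nat) : List.replicate m (1 : Int) ∈ pick m := by
  unfold pick
  have hpos : 1 ≤ 2 ^ m := Nat.one_le_two_pow
  have hsplit : 2 ^ m = (2 ^ m - 1) + 1 := by omega
  rw [hsplit, List.range_succ, List.foldl_append]
  simp only [List.foldl_cons, List.foldl_nil]
  have hst := pick_state m (2 ^ m - 1) (by omega)
  rw [hst, bitsLE_top]
  simp [List.reverse_replicate]

theorem mem_total (x : List (List Int)) (acc : List Int) (a : Int) :
    a ∈ x.foldl (fun t s =>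
      s.foldl (fun t e => if t.contains e then t else t ++ [e]) t) acc
    ↔ a ∈ acc ∨ ∃ s ∈ x, a ∈ s := by
  induction x generalizing acc with
  | nil => simp
  | cons s rest ih =>
    simp only [List.foldl_cons, ih, mem_dedupFold]
    constructor
    · rintro ((h | h) | ⟨t, ht, hat⟩)
      · exact Or.inl h
      · exact Or.inr ⟨s, by simp, h⟩
      · exact Or.inr ⟨t, by simp [ht], hat⟩
    · rintro (h | ⟨t, ht, hat⟩)
      · exact Or.inl (Or.inl h)
      · rcases List.mem_cons.mp ht with rfl | ht
        · exact Or.inl (Or.inr hat)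
        · exact Or.inr ⟨t, ht, hat⟩

-- B's final scan, read as a proposition about the union of the family
theorem altCond_iff (x : List (List Int)) :
    (x.any (fun s =>
      (x.foldl (fun t s' =>
        s'.foldl (fun t e => if t.contains e then t else t ++ [e]) t) []).all
        (fun e => s.contains e)) = true)
    ↔ ∃ T ∈ x, ∀ a, (∃ s ∈ x, a ∈ s) → a ∈ T := by
  rw [List.any_eq_true]
  constructor
  · rintro ⟨T, hT, hall⟩
    refine ⟨T, hT, fun a ha => ?_⟩
    have hm : a ∈ x.foldl (fun t s' =>
        s'.foldl (fun t e => if t.contains e then t else t ++ [e]) t) [] :=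
      (mem_total x [] a).mpr (Or.inr ha)
    have := List.all_eq_true.mp hall a hm
    exact List.contains_iff_mem.mp (by simpa using this)
  · rintro ⟨T, hT, hcov⟩
    refine ⟨T, hT, List.all_eq_true.mpr fun a ha => ?_⟩
    rcases (mem_total x [] a).mp ha with h | h
    · simp at h
    · simpa using List.contains_iff_mem.mpr (hcov a h)

-- ===== VERDICT (by name: the statement is the Claim_ definition above) =====
theorem legal_spec : Claim_equal_legal := by
  intro x _
  unfold Spec_legal legal legal_alt
  rw [hasLen_eq, hasLen_eq]
  by_cases h0 : x.any (fun s => s.length = 0) = true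
  · by_cases h3 : x.any (fun s => s.length = 3) = true
    · by_cases hU : ∃ T ∈ x, ∀ a, (∃ s ∈ x, a ∈ s) → a ∈ T
      · have hB := (altCond_iff x).mpr hU
        have h1 : legalLoop x (pick x.length) = 1 := by
          rcases hU with ⟨T, hT, hcov⟩
          exact legalLoop_all_pass x T hT (fun s hs a ha => hcov a ⟨s, hs, ha⟩) _
        rw [h0, h3, hB, h1]
        norm_num
      · have hB : (x.any (fun s =>
            (x.foldl (fun t s' =>
              s'.foldl (fun t e => if t.contains e then t else t ++ [e]) t) []).all
              (fun e => s.contains e))) = false := by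
          simpa using fun h => hU ((altCond_iff x).mp h)
        have h1 : legalLoop x (pick x.length) = 0 := by
          refine legalLoop_zero x _ _ (ones_mem_pick x.length) ?_
          rw [subsetA_eq]
          refine if_neg ?_
          rintro ⟨t, ht, hcov⟩
          refine hU ⟨t, ht, fun a ha => ?_⟩
          rcases ha with ⟨s, hs, has⟩
          rcases List.mem_iff_getElem.mp hs with ⟨i, hilt, rfl⟩
          exact hcov a (innerA_ones_full x i hilt a has)
        rw [h0, h3, hB, h1]
        norm_num
    · have h3f : (x.any (fun s => s.length = 3)) = false := Bool.eq_false_iff.mpr h3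
      rw [h0, h3f]
      norm_num
  · have h0f : (x.any (fun s => s.length = 0)) = false := Bool.eq_false_iff.mpr h0
    rw [h0f]
    norm_num
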